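-- pv_equiv track=rewrite | github.com/alina-tariq/hashtable-py | hashtable.py | sepChain
-- ===== SOURCE A (Python) =====
-- def hashFunc(key):
--     pos = ((3 * key) + 5) % 11
--
--     return pos
--
-- def sepChain(values):
--     hashTable = [[],] * len(values)
--     pos = [hashFunc(value) for value in values]
--
--     for a in range(len(pos)):
--         if not hashTable[pos[a]]:
--             hashTable[pos[a]] = [values[a]]
--         else:
--             hashTable[pos[a]].append(values[a])
--
--     return hashTable
-- ===== SOURCE B (Python) =====
-- def hashFunc(key):
--     pos = ((3 * key) + 5) % 11
--     return pos
--
-- def sepChain(values):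
--     # output-slot driven: for each distinct occupied hash position, fill that
--     # slot of the table with a scan of values for the ones hashing there
--     hashTable = [[],] * len(values)
--     for p in set(hashFunc(v) for v in values):
--         hashTable[p] = [v for v in values if hashFunc(v) == p]
--     return hashTable
-- ===== Notes on version B (the rewrite author's own statement) =====
-- stated objective: alternative
-- what changed: B is output-slot driven: it iterates over the distinct occupied hash positions and fills each slot with one scan of values for the elements hashing there, instead of A's input-driven pass that checks and appends each value into its slot.
import Mathlib
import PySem

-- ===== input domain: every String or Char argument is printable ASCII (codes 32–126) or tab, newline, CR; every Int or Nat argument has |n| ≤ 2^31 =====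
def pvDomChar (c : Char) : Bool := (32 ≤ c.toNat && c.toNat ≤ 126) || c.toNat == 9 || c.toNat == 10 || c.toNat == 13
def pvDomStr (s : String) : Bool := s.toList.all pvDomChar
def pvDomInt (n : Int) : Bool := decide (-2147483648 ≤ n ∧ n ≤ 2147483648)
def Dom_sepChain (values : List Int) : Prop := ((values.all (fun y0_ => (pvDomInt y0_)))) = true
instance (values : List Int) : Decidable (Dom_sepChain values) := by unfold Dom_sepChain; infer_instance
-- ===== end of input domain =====

-- B is output-slot driven: it fills each distinct occupied hash position with one scan of
-- values, instead of A's input-driven check-or-append pass; return values agree on Pre_.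

-- shared module helper hashFunc (identical in Source A and Source B)
def hashFunc (key : Int) : Int := PySem.Int.mod (3 * key + 5) 11

-- ===== PORT A =====
def sepChain (values : List Int) : List (List Int) :=
  let hashTable := PySem.List.pyRepeat [([] : List Int)] (PySem.List.len values)
  let pos := values.map (fun value => hashFunc value)
  (PySem.List.pyRange 0 (PySem.List.len pos) 1).foldl
    (fun ht a =>
      if PySem.List.pyGetD ht (PySem.List.pyGetD pos a 0) [] = [] then
        PySem.List.pySetD ht (PySem.List.pyGetD pos a 0) [PySem.List.pyGetD values a 0]
      else
        PySem.List.pySetD ht (PySem.List.pyGetD pos a 0)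
          (PySem.List.pyGetD ht (PySem.List.pyGetD pos a 0) [] ++ [PySem.List.pyGetD values a 0]))
    hashTable

-- ===== PORT B =====
def sepChain_alt (values : List Int) : List (List Int) :=
  let hashTable := PySem.List.pyRepeat [([] : List Int)] (PySem.List.len values)
  (PySem.Set.ofList (values.map (fun v => hashFunc v))).foldl
    (fun ht p => PySem.List.pySetD ht p (values.filter (fun v => hashFunc v == p)))
    hashTable

-- ===== PRECONDITION & SPEC =====
-- Pre_ excludes exactly the inputs where A raises IndexError: some value hashes to a
-- position not below len(values).
def Pre_sepChain (values : List Int) : Prop :=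
  ∀ v ∈ values, PySem.Int.mod (3 * v + 5) 11 < (values.length : Int)
instance (values : List Int) : Decidable (Pre_sepChain values) := by
  unfold Pre_sepChain; infer_instance
def pvWitness_sepChain : List Int := [2]

def Spec_sepChain (values : List Int) (out : List (List Int)) : Prop := out = sepChain_alt values
instance (values : List Int) (out : List (List Int)) : Decidable (Spec_sepChain values out) := by
  unfold Spec_sepChain; infer_instance

-- ===== CLAIM (what is proved, stated in full; the proofs are below) =====
def Claim_equal_sepChain : Prop :=
  ∀ (values : List Int), Dom_sepChain values → Pre_sepChain values →
    Spec_sepChain values (sepChain values)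

-- ===== LEMMAS AND PROOFS =====

-- common normal form: slot for position i0 + k holds ht[k] ++ (values hashing there)
def appendFilt (ht : List (List Int)) (vs : List Int) (i : Int) : List (List Int) :=
  match ht with
  | [] => []
  | s :: t => (s ++ vs.filter (fun v => hashFunc v == i)) :: appendFilt t vs (i + 1)

theorem appendFilt_nilvs (ht : List (List Int)) (i : Int) : appendFilt ht [] i = ht := by
  induction ht generalizing i with
  | nil => rfl
  | cons s t ih => simp [appendFilt, ih]

theorem appendFilt_skip (ht : List (List Int)) (v : Int) (vs : List Int) (i : Int)
    (h : hashFunc v < i) : appendFilt ht (v :: vs) i = appendFilt ht vs i := by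
  induction ht generalizing i with
  | nil => rfl
  | cons s t ih =>
    have hne : (hashFunc v == i) = false := by simp; omega
    have hih := ih (i + 1) (by omega)
    simp [appendFilt, hne, hih]

theorem appendFilt_set (ht : List (List Int)) (k : Nat) (hk : k < ht.length)
    (v : Int) (vs : List Int) (i : Int) (hv : hashFunc v = i + k) :
    appendFilt (ht.set k (ht[k] ++ [v])) vs i = appendFilt ht (v :: vs) i := by
  induction ht generalizing k i with
  | nil => simp at hk
  | cons s t ih =>
    cases k with
    | zero =>
      have hEq : (hashFunc v == i) = true := by simp; omega
      have hskip := appendFilt_skip t v vs (i + 1) (by omega)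
      simp [appendFilt, hEq, hskip]
    | succ k' =>
      have hne : (hashFunc v == i) = false := by simp; omega
      have hih := ih k' (by simpa using hk) (i + 1) (by omega)
      simp [appendFilt, hne, hih]

-- the A-side value loop
theorem foldlA_eq_appendFilt (vs : List Int) (ht : List (List Int))
    (hb : ∀ v ∈ vs, hashFunc v < (ht.length : Int)) :
    vs.foldl (fun ht v =>
        if PySem.List.pyGetD ht (hashFunc v) [] = [] then
          PySem.List.pySetD ht (hashFunc v) [v]
        else
          PySem.List.pySetD ht (hashFunc v) (PySem.List.pyGetD ht (hashFunc v) [] ++ [v]))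
      ht = appendFilt ht vs 0 := by
  induction vs generalizing ht with
  | nil => simpa using (appendFilt_nilvs ht 0).symm
  | cons v vs ih =>
    have h0 : (0:Int) ≤ hashFunc v := PySem.Int.mod_nonneg _ (by omega)
    have h1 : hashFunc v < (ht.length : Int) := hb v (by simp)
    have hkn : (hashFunc v).toNat < ht.length := by omega
    have hget : PySem.List.pyGetD ht (hashFunc v) [] = ht[(hashFunc v).toNat] :=
      PySem.List.pyGetD_eq_getElem ht [] h0 h1
    have hstep : (if PySem.List.pyGetD ht (hashFunc v) [] = [] then
          PySem.List.pySetD ht (hashFunc v) [v]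
        else
          PySem.List.pySetD ht (hashFunc v) (PySem.List.pyGetD ht (hashFunc v) [] ++ [v]))
        = ht.set (hashFunc v).toNat (ht[(hashFunc v).toNat] ++ [v]) := by
      rw [hget]
      by_cases he : ht[(hashFunc v).toNat] = ([] : List Int)
      · simp [he, PySem.List.pySetD_of_nonneg ht _ h0]
      · simp [he, PySem.List.pySetD_of_nonneg ht _ h0]
    rw [List.foldl_cons, hstep, ih _ ?_]
    · exact appendFilt_set ht (hashFunc v).toNat hkn v vs 0 (by omega)
    · intro w hw
      have := hb w (by simp [hw])
      simpa using this

-- elementwise view of the normal form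
theorem appendFilt_getElem? (ht : List (List Int)) (vs : List Int) (i : Int) (k : Nat) :
    (appendFilt ht vs i)[k]?
      = ht[k]?.map (fun s => s ++ vs.filter (fun v => hashFunc v == i + (k : Int))) := by
  induction ht generalizing i k with
  | nil => simp [appendFilt]
  | cons s t ih =>
    cases k with
    | zero => simp [appendFilt]
    | succ k' =>
      simp only [appendFilt, List.getElem?_cons_succ]
      have hc : i + 1 + (k' : Int) = i + ((k' + 1 : Nat) : Int) := by push_cast; ring
      rw [ih, hc]

-- the placement pass of B, characterised elementwise
theorem placed_getElem? (vals : List Int) (L : List Int) (ht : List (List Int))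
    (hL : ∀ p ∈ L, 0 ≤ p ∧ p < (ht.length : Int)) (k : Nat) :
    (L.foldl (fun ht p => PySem.List.pySetD ht p (vals.filter (fun v => hashFunc v == p))) ht)[k]?
      = if (k : Int) ∈ L then some (vals.filter (fun v => hashFunc v == (k : Int)))
        else ht[k]? := by
  induction L generalizing ht with
  | nil => simp
  | cons p t ih =>
    obtain ⟨h0, h1⟩ := hL p (by simp)
    rw [List.foldl_cons, PySem.List.pySetD_of_nonneg ht _ h0]
    rw [ih (ht.set p.toNat _) ?_]
    · by_cases hmt : (k : Int) ∈ t
      · simp [hmt]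
      · by_cases hkp : (k : Int) = p
        · have hk1 : p.toNat = k := by omega
          have hklen : k < ht.length := by omega
          simp [hmt, hklen, hk1, hkp.symm, ← hkp]
        · have hne : p.toNat ≠ k := by omega
          simp [hmt, hkp, hne]
    · intro q hq
      obtain ⟨g0, g1⟩ := hL q (by simp [hq])
      exact ⟨g0, by simpa using g1⟩

-- B's port equals the normal form
theorem sepChain_alt_eq (values : List Int) (hpre : Pre_sepChain values) :
    sepChain_alt values = appendFilt (List.replicate values.length []) values 0 := by
  simp only [sepChain_alt, PySem.List.len_eq, PySem.List.pyRepeat_singleton, Int.toNat_natCast]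
  apply List.ext_getElem?
  intro k
  rw [appendFilt_getElem?]
  set l := PySem.Set.ofList (values.map (fun v => hashFunc v)) with hl
  rw [placed_getElem? values l _ ?_ k]
  · by_cases hk : k < values.length
    · by_cases hmem : (k : Int) ∈ l
      · simp [hmem, hk]
      · have hnil : values.filter (fun v => hashFunc v == (k : Int)) = [] := by
          rw [List.filter_eq_nil_iff]
          intro v hv hb
          apply hmem
          rw [hl, PySem.Set.mem_ofList]
          exact List.mem_map.2 ⟨v, hv, by simpa using hb⟩
        simp [hmem, hk, hnil]
    · have h1 : (k:Int) ∉ l := by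
        intro hmem
        rw [hl, PySem.Set.mem_ofList] at hmem
        obtain ⟨v, hv, he⟩ := List.mem_map.1 hmem
        have := hpre v hv
        simp only [hashFunc] at he
        omega
      simp [h1, hk]
  · intro p hp
    rw [hl, PySem.Set.mem_ofList] at hp
    obtain ⟨v, hv, rfl⟩ := List.mem_map.1 hp
    refine ⟨PySem.Int.mod_nonneg _ (by omega), ?_⟩
    simpa [hashFunc] using hpre v hv

-- A's port equals the normal form
theorem sepChain_eq (values : List Int) (hpre : Pre_sepChain values) :
    sepChain values = appendFilt (List.replicate values.length []) values 0 := by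
  simp only [sepChain, PySem.List.len_eq, PySem.List.pyRepeat_singleton, Int.toNat_natCast,
    List.length_map]
  rw [PySem.List.foldl_congr_mem _ _
    (fun ht a =>
      (fun (ht : List (List Int)) (v : Int) =>
        if PySem.List.pyGetD ht (hashFunc v) [] = [] then
          PySem.List.pySetD ht (hashFunc v) [v]
        else
          PySem.List.pySetD ht (hashFunc v) (PySem.List.pyGetD ht (hashFunc v) [] ++ [v]))
        ht (PySem.List.pyGetD values a 0)) _ ?_]
  · rw [PySem.List.foldl_pyRange_zero_pyGetD' values 0
      (fun (ht : List (List Int)) (v : Int) =>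
        if PySem.List.pyGetD ht (hashFunc v) [] = [] then
          PySem.List.pySetD ht (hashFunc v) [v]
        else
          PySem.List.pySetD ht (hashFunc v) (PySem.List.pyGetD ht (hashFunc v) [] ++ [v]))
      (List.replicate values.length ([] : List Int))]
    apply foldlA_eq_appendFilt
    intro v hv
    simpa [hashFunc] using hpre v hv
  · intro acc a ha
    rw [PySem.List.mem_pyRange_one] at ha
    have halen : a.toNat < values.length := by omega
    have hpos : PySem.List.pyGetD (values.map (fun value => hashFunc value)) a 0
        = hashFunc (PySem.List.pyGetD values a 0) := by
      rw [PySem.List.pyGetD_eq_getElem _ _ ha.1 (by simpa using ha.2),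
          PySem.List.pyGetD_eq_getElem _ _ ha.1 (by exact_mod_cast ha.2)]
      simp
    rw [hpos]

-- ===== VERDICT (by name: the statement is the Claim_ definition above) =====
theorem sepChain_spec : Claim_equal_sepChain := by
  intro values hdom hpre
  unfold Spec_sepChain
  rw [sepChain_eq values hpre, sepChain_alt_eq values hpre]
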